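-- pv_equiv track=rewrite | github.com/j0ons/Sounrunner | app/engine/standard.py | _aggregate_scanner_status
-- ===== SOURCE A (Python) =====
-- def _aggregate_scanner_status(statuses: list[str]) -> str:
--     if not statuses:
--         return "skipped"
--     if all(status == "complete" for status in statuses):
--         return "complete"
--     if any(status == "complete" for status in statuses):
--         return "partial"
--     if all(status == "skipped" for status in statuses):
--         return "skipped"
--     return "partial"
-- ===== SOURCE B (Python) =====
-- def _aggregate_scanner_status(statuses: list[str]) -> str:
--     total = complete = skipped = 0
--     for status in statuses:
--         total += 1
--         if status == "complete":
--             complete += 1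
--         elif status == "skipped":
--             skipped += 1
--     if total == 0:
--         return "skipped"
--     if complete == total:
--         return "complete"
--     if complete > 0:
--         return "partial"
--     if skipped == total:
--         return "skipped"
--     return "partial"
-- ===== Notes on version B (the rewrite author's own statement) =====
-- stated objective: simpler
-- what changed: One counting pass over statuses (total/complete/skipped tallies) followed by a count-based branch, replacing A's three separate all/any rescans of the list.
import Mathlib
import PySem

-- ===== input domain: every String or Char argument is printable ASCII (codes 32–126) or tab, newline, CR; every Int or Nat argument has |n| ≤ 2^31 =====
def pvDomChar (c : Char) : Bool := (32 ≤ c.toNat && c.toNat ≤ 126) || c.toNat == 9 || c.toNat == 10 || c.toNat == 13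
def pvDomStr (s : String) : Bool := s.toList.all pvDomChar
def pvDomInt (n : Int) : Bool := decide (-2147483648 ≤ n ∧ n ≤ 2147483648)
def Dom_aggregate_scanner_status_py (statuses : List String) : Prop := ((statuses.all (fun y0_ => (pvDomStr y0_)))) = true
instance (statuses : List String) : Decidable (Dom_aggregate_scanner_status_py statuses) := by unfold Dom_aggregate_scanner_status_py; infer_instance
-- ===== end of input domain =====

-- B replaces A's three all/any rescans with one counting pass and a count-based branch (simpler decomposition).


-- ===== PORT A =====
def aggregate_scanner_status_py (statuses : List String) : String :=
  if statuses = [] then "skipped"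
  else if statuses.all (fun status => status == "complete") then "complete"
  else if statuses.any (fun status => status == "complete") then "partial"
  else if statuses.all (fun status => status == "skipped") then "skipped"
  else "partial"

-- ===== PORT B =====
def aggregate_scanner_status_py_alt (statuses : List String) : String :=
  let acc := statuses.foldl
    (fun (acc : Int × Int × Int) status =>
      (acc.1 + 1,
       (if status == "complete" then acc.2.1 + 1 else acc.2.1),
       (if status != "complete" && status == "skipped" then acc.2.2 + 1 else acc.2.2)))
    (0, 0, 0)
  if acc.1 = 0 then "skipped"
  else if acc.2.1 = acc.1 then "complete"
  else if acc.2.1 > 0 then "partial"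
  else if acc.2.2 = acc.1 then "skipped"
  else "partial"

-- ===== PRECONDITION & SPEC =====
def Spec_aggregate_scanner_status_py (statuses : List String) (out : String) : Prop := out = aggregate_scanner_status_py_alt statuses
instance (statuses : List String) (out : String) : Decidable (Spec_aggregate_scanner_status_py statuses out) := by unfold Spec_aggregate_scanner_status_py; infer_instance

-- ===== CLAIM (what is proved, stated in full; the proofs are below) =====
def Claim_equal_aggregate_scanner_status_py : Prop := ∀ (statuses : List String), Dom_aggregate_scanner_status_py statuses → Spec_aggregate_scanner_status_py statuses (aggregate_scanner_status_py statuses)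

-- ===== LEMMAS AND PROOFS =====

theorem pv_fold_counts (statuses : List String) (t c s : Int) :
    statuses.foldl
      (fun (acc : Int × Int × Int) status =>
        (acc.1 + 1,
         (if status == "complete" then acc.2.1 + 1 else acc.2.1),
         (if status != "complete" && status == "skipped" then acc.2.2 + 1 else acc.2.2)))
      (t, c, s)
    = (t + statuses.length,
       c + statuses.countP (fun st => st == "complete"),
       s + statuses.countP (fun st => st != "complete" && st == "skipped")) := by
  induction statuses generalizing t c s with
  | nil => simp
  | cons hd tl ih =>
    simp only [List.foldl_cons, ih, List.length_cons, List.countP_cons]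
    by_cases h1 : (hd == "complete") = true <;> by_cases h2 : (hd == "skipped") = true <;>
      simp [h1, h2, bne, Prod.ext_iff] <;> push_cast <;> omega

theorem pv_countP_complete_eq_length (l : List String)
    (h : l.countP (fun st => st == "complete") = l.length) :
    l.all (fun st => st == "complete") = true := by
  rw [List.all_eq_true]
  intro x hx
  exact (List.countP_eq_length.mp h) x hx

theorem pv_countP_skipped_eq_length (l : List String)
    (h : l.countP (fun st => st != "complete" && st == "skipped") = l.length) :
    l.all (fun st => st == "skipped") = true := by
  rw [List.all_eq_true]
  intro x hx
  exact (Bool.and_elim_right ((List.countP_eq_length.mp h) x hx))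

-- ===== VERDICT (by name: the statement is the Claim_ definition above) =====
theorem aggregate_scanner_status_py_spec : Claim_equal_aggregate_scanner_status_py := by
  intro statuses _
  unfold Spec_aggregate_scanner_status_py aggregate_scanner_status_py aggregate_scanner_status_py_alt
  simp only [pv_fold_counts, Int.zero_add]
  set cc := statuses.countP (fun st => st == "complete") with hcc
  set cs := statuses.countP (fun st => st != "complete" && st == "skipped") with hcs
  have hccle : cc ≤ statuses.length := List.countP_le_length
  have hcsle : cs ≤ statuses.length := List.countP_le_length
  by_cases hnil : statuses = []
  · simp [hnil]
  · have hlen : statuses.length ≠ 0 := by simpa using (List.length_pos_iff.mpr hnil).ne'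
    simp only [if_neg hnil]
    have hlenZ : (statuses.length : Int) ≠ 0 := by exact_mod_cast hlen
    rw [if_neg hlenZ]
    by_cases hall : statuses.all (fun status => status == "complete") = true
    · have : cc = statuses.length := by
        rw [hcc, List.countP_eq_length]
        intro x hx; exact (List.all_eq_true.mp hall) x hx
      simp [hall, this]
    · have hccne : cc ≠ statuses.length := fun h => hall (pv_countP_complete_eq_length _ (by exact_mod_cast h))
      have hccneZ : (cc : Int) ≠ (statuses.length : Int) := by exact_mod_cast hccne
      rw [if_neg hall, if_neg hccneZ]
      by_cases hany : statuses.any (fun status => status == "complete") = true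
      · have hpos : 0 < cc := by
          rw [hcc, List.countP_pos_iff]
          obtain ⟨x, hx, hpx⟩ := List.any_eq_true.mp hany
          exact ⟨x, hx, hpx⟩
        have hposZ : (0 : Int) < (cc : Int) := by exact_mod_cast hpos
        rw [if_pos hany, if_pos hposZ]
      · have hzero : cc = 0 := by
          rw [hcc, List.countP_eq_zero]
          intro x hx
          exact fun hpx => hany (List.any_eq_true.mpr ⟨x, hx, hpx⟩)
        have hnotpos : ¬ ((0:Int) < (cc : Int)) := by simp [hzero]
        rw [if_neg hany, if_neg hnotpos]
        by_cases hsk : statuses.all (fun status => status == "skipped") = true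
        · have : cs = statuses.length := by
            rw [hcs, List.countP_eq_length]
            intro x hx
            have hxs := (List.all_eq_true.mp hsk) x hx
            have hxnc : (x != "complete") = true := by
              have : x = "skipped" := by simpa using hxs
              simp [this]
            simp [hxnc, hxs]
          simp [hsk, this]
        · have hcsne : cs ≠ statuses.length := fun h => hsk (pv_countP_skipped_eq_length _ h)
          have hcsneZ : (cs : Int) ≠ (statuses.length : Int) := by exact_mod_cast hcsne
          rw [if_neg hsk, if_neg hcsneZ]
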